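-- pv_equiv track=rewrite | github.com/hksawczuk/grahamtools | src/grahamtools/utils/automorphisms.py | _aut_size_bruteforce
-- ===== SOURCE A (Python) =====
-- from itertools import permutations
--
-- def _aut_size_bruteforce(edges: list[tuple[int, int]], n: int) -> int:
--     """Count automorphisms by brute force over S_n.
--
--     Only practical for very small n (n <= 8 or so).
--     """
--     adj = [0] * n
--     for u, v in edges:
--         adj[u] |= 1 << v
--         adj[v] |= 1 << u
--
--     count = 0
--     for perm in permutations(range(n)):
--         is_auto = True
--         for u in range(n):
--             mapped_neighbors = 0
--             nbr = adj[u]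
--             while nbr:
--                 lsb = nbr & -nbr
--                 v = lsb.bit_length() - 1
--                 nbr ^= lsb
--                 mapped_neighbors |= 1 << perm[v]
--             if mapped_neighbors != adj[perm[u]]:
--                 is_auto = False
--                 break
--         if is_auto:
--             count += 1
--     return count
-- ===== SOURCE B (Python) =====
-- def _aut_size_bruteforce(edges: list[tuple[int, int]], n: int) -> int:
--     """Count automorphisms by incremental backtracking.
--
--     Vertices 0..n-1 are assigned images one at a time; a partial assignment is
--     extended only when the new image is adjacency-consistent with every image
--     already chosen, so inconsistent branches are pruned immediately instead of
--     enumerating all n! candidate permutations.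
--     """
--     adj = [set() for _ in range(n)]
--     for u, v in edges:
--         adj[u].add(v)
--         adj[v].add(u)
--
--     def extend(mapping, avail):
--         if not avail:
--             return 1
--         k = len(mapping)
--         total = 0
--         for img in avail:
--             if (k in adj[k]) == (img in adj[img]) and all(
--                 (j in adj[k]) == (m in adj[img]) for j, m in enumerate(mapping)
--             ):
--                 total += extend(mapping + [img], [w for w in avail if w != img])
--         return total
--
--     return extend([], list(range(n)))
-- ===== Notes on version B (the rewrite author's own statement) =====
-- stated objective: faster
-- what changed: Replaced exhaustive enumeration of all n! permutations (each checked with bitmask neighbor remapping) by incremental backtracking that assigns vertex images one at a time and prunes any partial assignment as soon as a new image is adjacency-inconsistent with the images already chosen.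
import Mathlib
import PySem

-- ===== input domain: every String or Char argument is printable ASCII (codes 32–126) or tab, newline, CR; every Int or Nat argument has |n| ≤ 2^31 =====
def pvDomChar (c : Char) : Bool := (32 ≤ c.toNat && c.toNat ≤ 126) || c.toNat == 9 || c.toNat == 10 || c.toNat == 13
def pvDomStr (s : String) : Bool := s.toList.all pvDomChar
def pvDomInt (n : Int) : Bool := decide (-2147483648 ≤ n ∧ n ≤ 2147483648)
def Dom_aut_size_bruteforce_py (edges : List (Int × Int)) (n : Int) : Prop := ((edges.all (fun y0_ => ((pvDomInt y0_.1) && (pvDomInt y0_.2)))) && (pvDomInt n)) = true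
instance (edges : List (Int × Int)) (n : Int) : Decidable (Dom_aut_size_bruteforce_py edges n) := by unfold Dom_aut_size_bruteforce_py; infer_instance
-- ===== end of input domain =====

-- B replaces A's exhaustive scan of all n! permutations by incremental backtracking that
-- assigns vertex images one at a time and prunes adjacency-inconsistent partial assignments
-- immediately (objective: faster).


-- ===== PORT A =====
-- loop body of 'for u, v in edges: adj[u] |= 1 << v; adj[v] |= 1 << u'
-- (shifts are exact for the in-range endpoints admitted by Pre_; Python raises on the rest)
def pvStepA (adj : List Int) (q : Int × Int) : List Int :=
  let adj := PySem.List.pySetD adj q.1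
    (PySem.Int.bor (PySem.List.pyGetD adj q.1 0) ((1 : Int) <<< q.2.toNat))
  PySem.List.pySetD adj q.2
    (PySem.Int.bor (PySem.List.pyGetD adj q.2 0) ((1 : Int) <<< q.1.toNat))

-- 'while nbr: lsb = nbr & -nbr; v = lsb.bit_length() - 1; nbr ^= lsb; mapped |= 1 << perm[v]'
-- fuel = nbr.toNat suffices: nbr loses its lowest set bit each turn; the 'nbr ≤ 0' branch only
-- makes the recursion total (Python diverges on negative nbr, unreachable here: masks are ≥ 0);
-- perm entries come from range(n), hence ≥ 0, so '.toNat' on the shift amount is exact.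
def pvSpread (perm : List Int) : Nat → Int → Int → Int
  | 0, _, acc => acc
  | fuel + 1, nbr, acc =>
    if nbr ≤ 0 then acc
    else
      let lsb := PySem.Int.band nbr (-nbr)
      let v : Int := (PySem.Int.bitLength lsb : Int) - 1
      let nbr' := PySem.Int.bxor nbr lsb
      pvSpread perm fuel nbr' (PySem.Int.bor acc ((1 : Int) <<< (PySem.List.pyGetD perm v 0).toNat))

-- 'for u in range(n): ... if mapped != adj[perm[u]]: is_auto = False; break' — stop at first failure
def pvCheckRows (adj perm : List Int) : List Int → Bool
  | [] => true
  | u :: rest =>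
    let nbr := PySem.List.pyGetD adj u 0
    let mapped := pvSpread perm nbr.toNat nbr 0
    if mapped ≠ PySem.List.pyGetD adj (PySem.List.pyGetD perm u 0) 0 then false
    else pvCheckRows adj perm rest

def aut_size_bruteforce_py (edges : List (Int × Int)) (n : Int) : Int :=
  let adj : List Int := List.replicate n.toNat 0
  let adj := edges.foldl pvStepA adj
  let rn := PySem.List.pyRange 0 n 1
  (PySem.List.permutations rn rn.length).foldl
    (fun count perm => if pvCheckRows adj perm rn then count + 1 else count) 0

-- ===== PORT B =====
-- loop body of 'for u, v in edges: adj[u].add(v); adj[v].add(u)'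
def pvStepB (a : List (PySem.Set Int)) (q : Int × Int) : List (PySem.Set Int) :=
  let a := PySem.List.pySetD a q.1 (PySem.Set.add (PySem.List.pyGetD a q.1 PySem.Set.empty) q.2)
  PySem.List.pySetD a q.2 (PySem.Set.add (PySem.List.pyGetD a q.2 PySem.Set.empty) q.1)

-- '(k in adj[k]) == (img in adj[img]) and all((j in adj[k]) == (m in adj[img]) for j, m in enumerate(mapping))'
def pvRowOK (adjS : List (PySem.Set Int)) (k img : Int) (mapping : List Int) : Bool :=
  (PySem.Set.contains (PySem.List.pyGetD adjS k PySem.Set.empty) k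
     == PySem.Set.contains (PySem.List.pyGetD adjS img PySem.Set.empty) img)
  && (PySem.List.enumerate mapping 0).all (fun jm =>
       PySem.Set.contains (PySem.List.pyGetD adjS k PySem.Set.empty) jm.1
         == PySem.Set.contains (PySem.List.pyGetD adjS img PySem.Set.empty) jm.2)

-- extend(mapping, avail); the fuel argument (= avail.length at every call) is a pure totality guard
mutual
def pvExtend (adjS : List (PySem.Set Int)) (fuel : Nat) (mapping : List Int) (avail : List Int) : Int :=
  if avail.isEmpty then 1
  else match fuel with
    | 0 => 0
    | fuel' + 1 => pvExtendFor adjS fuel' mapping avail avail 0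
termination_by (fuel, avail.length + 1)

def pvExtendFor (adjS : List (PySem.Set Int)) (fuel' : Nat) (mapping avail : List Int)
    (iter : List Int) (total : Int) : Int :=
  match iter with
  | [] => total
  | img :: rest =>
    if pvRowOK adjS (mapping.length : Int) img mapping then
      pvExtendFor adjS fuel' mapping avail rest
        (total + pvExtend adjS fuel' (mapping ++ [img]) (avail.filter (fun w => w ≠ img)))
    else pvExtendFor adjS fuel' mapping avail rest total
termination_by (fuel' + 1, iter.length)
end

def aut_size_bruteforce_py_alt (edges : List (Int × Int)) (n : Int) : Int :=
  let adjS : List (PySem.Set Int) := (List.range n.toNat).map (fun _ => PySem.Set.empty)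
  let adjS := edges.foldl pvStepB adjS
  let rn := PySem.List.pyRange 0 n 1
  pvExtend adjS rn.length [] rn

-- ===== PRECONDITION & SPEC =====
-- Pre_ excludes exactly the inputs on which A raises: an edge endpoint ≥ n (IndexError)
-- or a negative endpoint (ValueError from the negative shift '1 << u').
def Pre_aut_size_bruteforce_py (edges : List (Int × Int)) (n : Int) : Prop :=
  ∀ q ∈ edges, 0 ≤ q.1 ∧ q.1 < n ∧ 0 ≤ q.2 ∧ q.2 < n
instance (edges : List (Int × Int)) (n : Int) : Decidable (Pre_aut_size_bruteforce_py edges n) := by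
  unfold Pre_aut_size_bruteforce_py; infer_instance

def pvWitness_aut_size_bruteforce_py : (List (Int × Int)) × Int := ([(0, 1), (1, 2)], 3)

def Spec_aut_size_bruteforce_py (edges : List (Int × Int)) (n : Int) (out : Int) : Prop :=
  out = aut_size_bruteforce_py_alt edges n
instance (edges : List (Int × Int)) (n : Int) (out : Int) : Decidable (Spec_aut_size_bruteforce_py edges n out) := by
  unfold Spec_aut_size_bruteforce_py; infer_instance

-- ===== CLAIM (what is proved, stated in full; the proofs are below) =====
def Claim_equal_aut_size_bruteforce_py : Prop := ∀ (edges : List (Int × Int)) (n : Int), Dom_aut_size_bruteforce_py edges n → Pre_aut_size_bruteforce_py edges n → Spec_aut_size_bruteforce_py edges n (aut_size_bruteforce_py edges n)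

-- ===== LEMMAS AND PROOFS =====

lemma pv_tb_mul_add (a b i : Nat) (hb : b < 2 ^ i) (j : Nat) :
    (2 ^ i * a + b).testBit j = if j < i then b.testBit j else a.testBit (j - i) := by
  induction i generalizing b j with
  | zero =>
    interval_cases b
    simp
  | succ i ih =>
    have hp : (2:Nat) ^ (i+1) = 2 * 2 ^ i := by ring
    have hsplit : (2 ^ (i+1) * a + b) / 2 = 2 ^ i * a + b / 2 := by
      rw [hp, Nat.mul_assoc]; omega
    cases j with
    | zero =>
      rw [Nat.testBit_zero, Nat.testBit_zero]
      have h2 : (2 ^ (i+1) * a + b) % 2 = b % 2 := by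
        rw [hp, Nat.mul_assoc]; omega
      simp [h2]
    | succ j =>
      rw [Nat.testBit_add_one, hsplit, ih (b/2) (by omega) j]
      rcases Nat.lt_or_ge j i with h | h
      · simp [h, Nat.succ_lt_succ h, Nat.testBit_add_one]
      · have hx : ¬ (j < i) := by omega
        have hy : ¬ (j + 1 < i + 1) := by omega
        simp [hx, hy, Nat.succ_sub_succ]

lemma pv_odd_part (m : Nat) (hm : 0 < m) : ∃ k q, m = 2 ^ k * (2 * q + 1) := by
  induction m using Nat.strong_induction_on with
  | _ m ih =>
    rcases Nat.even_or_odd m with he | ho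
    · obtain ⟨t, ht⟩ := he
      have ht' : m = 2 * t := by omega
      obtain ⟨k, q, hkq⟩ := ih t (by omega) (by omega)
      exact ⟨k + 1, q, by rw [ht', hkq]; ring⟩
    · obtain ⟨t, ht⟩ := ho
      exact ⟨0, t, by omega⟩

lemma pv_tb_m (k q j : Nat) :
    (2 ^ k * (2 * q + 1)).testBit j =
      if j < k then false else (2 * q + 1).testBit (j - k) := by
  have := pv_tb_mul_add (2 * q + 1) 0 k (by positivity) j
  simpa using this

lemma pv_tb_m1 (k q j : Nat) :
    (2 ^ k * (2 * q + 1) - 1).testBit j =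
      if j < k + 1 then decide (j < k) else q.testBit (j - (k + 1)) := by
  have h1 : 0 < 2 ^ k := by positivity
  have hp : (2:Nat) ^ (k+1) = 2 * 2 ^ k := by ring
  have hm : 2 ^ k * (2 * q + 1) = 2 ^ (k + 1) * q + 2 ^ k := by rw [hp]; ring
  have he : 2 ^ k * (2 * q + 1) - 1 = 2 ^ (k + 1) * q + (2 ^ k - 1) := by omega
  rw [he, pv_tb_mul_add q (2 ^ k - 1) (k+1) (by omega) j]
  rcases Nat.lt_or_ge j (k+1) with h | h
  · simp [h, Nat.testBit_two_pow_sub_one]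
  · have : ¬ (j < k + 1) := by omega
    simp [this]

lemma pv_tb_rest (k q j : Nat) :
    (2 ^ (k + 1) * q).testBit j = if j < k + 1 then false else q.testBit (j - (k + 1)) := by
  have := pv_tb_mul_add q 0 (k+1) (by positivity) j
  simpa using this

lemma pv_and_pred (k q : Nat) :
    (2 ^ k * (2 * q + 1)) &&& (2 ^ k * (2 * q + 1) - 1) = 2 ^ (k + 1) * q := by
  apply Nat.eq_of_testBit_eq
  intro j
  rw [Nat.testBit_and, pv_tb_m, pv_tb_m1, pv_tb_rest]
  rcases Nat.lt_trichotomy j k with h | h | h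
  · simp [h, (by omega : j < k + 1)]
  · subst h
    simp
  · have h1 : ¬ (j < k) := by omega
    have h2 : ¬ (j < k + 1) := by omega
    simp [h1, h2]
    intro hb
    have hjk : j - k = (j - (k+1)) + 1 := by omega
    rw [hjk, Nat.testBit_add_one]
    have hq : (2 * q + 1) / 2 = q := by omega
    rw [hq]
    exact hb

lemma pv_band_lsb (k q : Nat) :
    PySem.Int.band ((2 ^ k * (2 * q + 1) : Nat) : Int) (-((2 ^ k * (2 * q + 1) : Nat) : Int))
      = ((2 ^ k : Nat) : Int) := by
  have hm : 0 < 2 ^ k * (2 * q + 1) := by positivity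
  rw [PySem.Int.band]
  have h1 : (0:Int) ≤ ((2 ^ k * (2 * q + 1) : Nat) : Int) := by positivity
  have h2 : ¬ ((0:Int) ≤ -((2 ^ k * (2 * q + 1) : Nat) : Int)) := by simp
  rw [if_pos h1, if_neg h2]
  have h3 : (-(-((2 ^ k * (2 * q + 1) : Nat) : Int)) - 1).toNat = 2 ^ k * (2 * q + 1) - 1 := by
    omega
  have h4 : (((2 ^ k * (2 * q + 1) : Nat) : Int)).toNat = 2 ^ k * (2 * q + 1) := by omega
  rw [h3, h4, pv_and_pred]
  have hp : (2:Nat) ^ (k + 1) = 2 * 2 ^ k := by ring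
  have hm2 : 2 ^ k * (2 * q + 1) = 2 ^ (k + 1) * q + 2 ^ k := by rw [hp]; ring
  omega

lemma pv_bxor_lsb (k q : Nat) :
    PySem.Int.bxor ((2 ^ k * (2 * q + 1) : Nat) : Int) ((2 ^ k : Nat) : Int)
      = ((2 ^ (k + 1) * q : Nat) : Int) := by
  rw [PySem.Int.bxor]
  have h1 : (0:Int) ≤ ((2 ^ k * (2 * q + 1) : Nat) : Int) := by positivity
  have h2 : (0:Int) ≤ ((2 ^ k : Nat) : Int) := by positivity
  rw [if_pos h1, if_pos h2]
  have h3 : (((2 ^ k * (2 * q + 1) : Nat) : Int)).toNat = 2 ^ k * (2 * q + 1) := by omega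
  have h4 : (((2 ^ k : Nat) : Int)).toNat = 2 ^ k := by omega
  rw [h3, h4]
  congr 1
  apply Nat.eq_of_testBit_eq
  intro j
  rw [Nat.testBit_xor, pv_tb_m, pv_tb_rest, Nat.testBit_two_pow]
  rcases Nat.lt_trichotomy j k with h | h | h
  · have hd : decide (k = j) = false := decide_eq_false_iff_not.mpr (by omega)
    simp [h, (by omega : j < k + 1), hd]
  · subst h
    simp
  · have h1 : ¬ (j < k) := by omega
    have h2 : ¬ (j < k + 1) := by omega
    have hd : decide (k = j) = false := decide_eq_false_iff_not.mpr (by omega)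
    simp [h1, h2, hd]
    have hjk : j - k = (j - (k+1)) + 1 := by omega
    rw [hjk, Nat.testBit_add_one]
    have hq : (2 * q + 1) / 2 = q := by omega
    rw [hq]

lemma pv_testBit_split (k q j : Nat) :
    (2 ^ k * (2 * q + 1)).testBit j = (decide (j = k) || (2 ^ (k + 1) * q).testBit j) := by
  rw [pv_tb_m, pv_tb_rest]
  rcases Nat.lt_trichotomy j k with h | h | h
  · have hd : decide (j = k) = false := decide_eq_false_iff_not.mpr (by omega)
    simp [h, (by omega : j < k + 1), hd]
  · subst h
    simp
  · have h1 : ¬ (j < k) := by omega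
    have h2 : ¬ (j < k + 1) := by omega
    have hd : decide (j = k) = false := decide_eq_false_iff_not.mpr (by omega)
    simp [h1, h2, hd]
    have hjk : j - k = (j - (k+1)) + 1 := by omega
    rw [hjk, Nat.testBit_add_one]
    have hq : (2 * q + 1) / 2 = q := by omega
    rw [hq]

lemma pv_bitLength_two_pow (k : Nat) : PySem.Int.bitLength (((2 ^ k : Nat) : Int)) = k + 1 := by
  induction k with
  | zero => decide
  | succ k ih =>
    rw [PySem.Int.bitLength_natCast (by positivity)]
    have : 2 ^ (k + 1) / 2 = 2 ^ k := by
      have : 2 ^ (k+1) = 2 * 2 ^ k := by ring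
      omega
    rw [this, ih]

lemma pv_shl_one (k : Nat) : (1 : Int) <<< k = ((2 ^ k : Nat) : Int) := by
  simp [Int.shiftLeft_eq]

lemma pv_spread_char (perm : List Int) :
    ∀ (m : Nat) (fuel : Nat), m ≤ fuel → ∀ (ac : Nat),
      ∃ r : Nat, pvSpread perm fuel (m : Int) (ac : Int) = (r : Int) ∧
        ∀ w : Nat, (r.testBit w = true ↔ ac.testBit w = true ∨
          ∃ v : Nat, m.testBit v = true ∧ (PySem.List.pyGetD perm (v : Int) 0).toNat = w) := by
  intro m
  induction m using Nat.strong_induction_on with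
  | _ m ih =>
    intro fuel hfuel ac
    rcases Nat.eq_zero_or_pos m with hm0 | hmpos
    · subst hm0
      refine ⟨ac, ?_, ?_⟩
      · cases fuel with
        | zero => rfl
        | succ f => simp [pvSpread]
      · intro w; simp
    · obtain ⟨k, q, hkq⟩ := pv_odd_part m hmpos
      cases fuel with
      | zero => omega
      | succ f =>
        have hguard : ¬ ((m : Int) ≤ 0) := by
          simp
          omega
        rw [pvSpread]
        simp only [hguard, if_false]
        subst hkq
        rw [pv_band_lsb, pv_bitLength_two_pow, pv_bxor_lsb]
        have hv : ((k + 1 : Nat) : Int) - 1 = ((k : Nat) : Int) := by push_cast; ring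
        rw [hv, pv_shl_one, PySem.Int.bor_natCast]
        set p : Nat := (PySem.List.pyGetD perm ((k : Nat) : Int) 0).toNat with hp
        have hlt : 2 ^ (k + 1) * q < 2 ^ k * (2 * q + 1) := by
          have h2 : (2:Nat) ^ (k+1) = 2 * 2 ^ k := by ring
          have h3 : (0:Nat) < 2 ^ k := by positivity
          calc 2 ^ (k+1) * q = 2 ^ k * (2 * q) := by rw [h2]; ring
          _ < 2 ^ k * (2 * q + 1) := by
              exact (Nat.mul_lt_mul_left h3).mpr (by omega)
        obtain ⟨r, hr, hchar⟩ := ih (2 ^ (k + 1) * q) hlt f (by omega) (ac ||| 2 ^ p)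
        refine ⟨r, hr, ?_⟩
        intro w
        rw [hchar w]
        constructor
        · rintro (hb | ⟨v, hv1, hv2⟩)
          · rw [Nat.testBit_or, Nat.testBit_two_pow] at hb
            rcases (by simpa using hb : _ ∨ _) with h | h
            · exact Or.inl h
            · right
              refine ⟨k, ?_, ?_⟩
              · rw [pv_testBit_split]; simp
              · rw [← h]
          · right
            exact ⟨v, by rw [pv_testBit_split]; simp [hv1], hv2⟩
        · rintro (hb | ⟨v, hv1, hv2⟩)
          · left; rw [Nat.testBit_or, hb]; simp
          · rw [pv_testBit_split] at hv1
            rcases (by simpa using hv1 : _ ∨ _) with h | h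
            · subst h
              left
              rw [Nat.testBit_or, Nat.testBit_two_pow, ← hv2]
              simp [hp]
            · right
              exact ⟨v, h, hv2⟩

def pvEAdj (edges : List (Int × Int)) (a b : Int) : Bool :=
  edges.any (fun q => (q.1 == a && q.2 == b) || (q.1 == b && q.2 == a))

lemma pv_upd_char (a : List Int) (g : Nat → Nat → Bool) (x y : Int)
    (hx : 0 ≤ x) (hx2 : x < (a.length : Int)) (hy : 0 ≤ y)
    (hinv : ∀ u : Nat, u < a.length → ∃ M : Nat, a.getD u 0 = (M : Int) ∧ ∀ w, M.testBit w = g u w) :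
    (PySem.List.pySetD a x (PySem.Int.bor (PySem.List.pyGetD a x 0) ((1 : Int) <<< y.toNat))).length = a.length ∧
    ∀ u : Nat, u < a.length → ∃ M : Nat,
      (PySem.List.pySetD a x (PySem.Int.bor (PySem.List.pyGetD a x 0) ((1 : Int) <<< y.toNat))).getD u 0 = (M : Int) ∧
      ∀ w, M.testBit w = (g u w || (decide (u = x.toNat) && decide (w = y.toNat))) := by
  have hxl : x.toNat < a.length := by omega
  obtain ⟨Mx, hMx, hMxc⟩ := hinv x.toNat hxl
  have hget : PySem.List.pyGetD a x 0 = (Mx : Int) := by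
    rw [PySem.List.pyGetD_eq_getElem a 0 hx (by exact_mod_cast hx2)]
    rw [← List.getD_eq_getElem a 0 hxl]
    exact hMx
  rw [PySem.List.pySetD_of_nonneg a _ hx, hget, pv_shl_one, PySem.Int.bor_natCast]
  refine ⟨by simp, ?_⟩
  intro u hu
  by_cases hux : u = x.toNat
  · subst hux
    refine ⟨Mx ||| 2 ^ y.toNat, ?_, ?_⟩
    · rw [List.getD_eq_getElem _ 0 (by simpa using hu), List.getElem_set_self]
    · intro w
      rw [Nat.testBit_or, Nat.testBit_two_pow, hMxc]
      by_cases hw : w = y.toNat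
      · subst hw; simp
      · simp [hw]
        intro h
        exact absurd h.symm hw
  · obtain ⟨M, hM, hMc⟩ := hinv u hu
    refine ⟨M, ?_, ?_⟩
    · rw [List.getD_eq_getElem _ 0 (by simpa using hu),
        List.getElem_set_ne (by omega), ← List.getD_eq_getElem a 0 hu]
      exact hM
    · intro w
      simp [hux, hMc]

lemma pv_buildA_inv (es : List (Int × Int)) :
    ∀ (a : List Int) (g : Nat → Nat → Bool),
      (∀ q ∈ es, 0 ≤ q.1 ∧ q.1 < (a.length : Int) ∧ 0 ≤ q.2 ∧ q.2 < (a.length : Int)) →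
      (∀ u : Nat, u < a.length → ∃ M : Nat, a.getD u 0 = (M : Int) ∧ ∀ w, M.testBit w = g u w) →
      (es.foldl pvStepA a).length = a.length ∧
      ∀ u : Nat, u < a.length → ∃ M : Nat,
        (es.foldl pvStepA a).getD u 0 = (M : Int) ∧
        ∀ w, M.testBit w = (g u w || pvEAdj es (u : Int) (w : Int)) := by
  induction es with
  | nil =>
    intro a g _ hinv
    refine ⟨rfl, ?_⟩
    intro u hu
    obtain ⟨M, hM, hMc⟩ := hinv u hu
    exact ⟨M, hM, by simp [pvEAdj, hMc]⟩
  | cons e es ih =>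
    intro a g hb hinv
    rw [List.foldl_cons]
    obtain ⟨hx, hx2, hy, hy2⟩ := hb e (by simp)
    obtain ⟨hl1, hc1⟩ := pv_upd_char a g e.1 e.2 hx hx2 hy hinv
    set a1 := PySem.List.pySetD a e.1 (PySem.Int.bor (PySem.List.pyGetD a e.1 0) ((1 : Int) <<< e.2.toNat)) with ha1
    obtain ⟨hl2, hc2⟩ := pv_upd_char a1
      (fun u w => g u w || (decide (u = e.1.toNat) && decide (w = e.2.toNat)))
      e.2 e.1 hy (by rw [hl1]; exact hy2) hx (by rw [hl1]; exact hc1)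
    set a2 := PySem.List.pySetD a1 e.2 (PySem.Int.bor (PySem.List.pyGetD a1 e.2 0) ((1 : Int) <<< e.1.toNat)) with ha2
    have hl2' : a2.length = a.length := by rw [hl2, hl1]
    obtain ⟨hl3, hc3⟩ := ih a2
      (fun u w => (g u w || (decide (u = e.1.toNat) && decide (w = e.2.toNat))) ||
        (decide (u = e.2.toNat) && decide (w = e.1.toNat)))
      (by rw [hl2']; intro q hq; exact hb q (by simp [hq]))
      (by rw [hl2']; intro u hu; exact hc2 u (by omega))
    rw [hl2'] at hl3 hc3
    have hstep : pvStepA a e = a2 := by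
      rw [pvStepA, ← ha1, ← ha2]
    rw [hstep]
    refine ⟨?_, ?_⟩
    · exact hl3
    · intro u hu
      obtain ⟨M, hM, hMc⟩ := hc3 u hu
      refine ⟨M, hM, ?_⟩
      intro w
      rw [hMc w]
      show _ = (g u w || pvEAdj (e :: es) (u : Int) (w : Int))
      simp only [pvEAdj, List.any_cons]
      have h1 : (e.1 == (u : Int)) = decide (u = e.1.toNat) := by
        apply Bool.eq_iff_iff.mpr
        simp
        omega
      have h2 : (e.2 == (w : Int)) = decide (w = e.2.toNat) := by
        apply Bool.eq_iff_iff.mpr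
        simp
        omega
      have h3 : (e.1 == (w : Int)) = decide (w = e.1.toNat) := by
        apply Bool.eq_iff_iff.mpr
        simp
        omega
      have h4 : (e.2 == (u : Int)) = decide (u = e.2.toNat) := by
        apply Bool.eq_iff_iff.mpr
        simp
        omega
      rw [h1, h2, h3, h4]
      cases hg : g u w <;> cases hd1 : decide (u = e.1.toNat) <;> cases hd2 : decide (w = e.2.toNat) <;>
        cases hd3 : decide (u = e.2.toNat) <;> cases hd4 : decide (w = e.1.toNat) <;> simp

lemma pv_contains_add (s : PySem.Set Int) (x w : Int) :
    PySem.Set.contains (PySem.Set.add s x) w = (PySem.Set.contains s w || (w == x)) := by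
  apply Bool.eq_iff_iff.mpr
  simp [PySem.Set.contains_eq_decide, PySem.Set.mem_add]

lemma pv_upd_charB (a : List (PySem.Set Int)) (g : Nat → Int → Bool) (x y : Int)
    (hx : 0 ≤ x) (hx2 : x < (a.length : Int))
    (hinv : ∀ u : Nat, u < a.length → ∀ w : Int, PySem.Set.contains (a.getD u PySem.Set.empty) w = g u w) :
    (PySem.List.pySetD a x (PySem.Set.add (PySem.List.pyGetD a x PySem.Set.empty) y)).length = a.length ∧
    ∀ u : Nat, u < a.length → ∀ w : Int,
      PySem.Set.contains ((PySem.List.pySetD a x (PySem.Set.add (PySem.List.pyGetD a x PySem.Set.empty) y)).getD u PySem.Set.empty) w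
        = (g u w || (decide (u = x.toNat) && (w == y))) := by
  have hxl : x.toNat < a.length := by omega
  have hget : PySem.List.pyGetD a x PySem.Set.empty = a.getD x.toNat PySem.Set.empty := by
    rw [PySem.List.pyGetD_eq_getElem a PySem.Set.empty hx (by exact_mod_cast hx2)]
    rw [← List.getD_eq_getElem a PySem.Set.empty hxl]
  rw [PySem.List.pySetD_of_nonneg a _ hx, hget]
  refine ⟨by simp, ?_⟩
  intro u hu w
  by_cases hux : u = x.toNat
  · subst hux
    rw [List.getD_eq_getElem _ _ (by simpa using hu), List.getElem_set_self,
      pv_contains_add, hinv x.toNat hxl w]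
    simp
  · rw [List.getD_eq_getElem _ _ (by simpa using hu), List.getElem_set_ne (by omega),
      ← List.getD_eq_getElem a PySem.Set.empty hu, hinv u hu w]
    simp [hux]

lemma pv_buildB_inv (es : List (Int × Int)) :
    ∀ (a : List (PySem.Set Int)) (g : Nat → Int → Bool),
      (∀ q ∈ es, 0 ≤ q.1 ∧ q.1 < (a.length : Int) ∧ 0 ≤ q.2 ∧ q.2 < (a.length : Int)) →
      (∀ u : Nat, u < a.length → ∀ w : Int, PySem.Set.contains (a.getD u PySem.Set.empty) w = g u w) →
      (es.foldl pvStepB a).length = a.length ∧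
      ∀ u : Nat, u < a.length → ∀ w : Int,
        PySem.Set.contains ((es.foldl pvStepB a).getD u PySem.Set.empty) w
          = (g u w || pvEAdj es (u : Int) w) := by
  induction es with
  | nil =>
    intro a g _ hinv
    refine ⟨rfl, ?_⟩
    intro u hu w
    rw [List.foldl_nil, hinv u hu w]
    simp [pvEAdj]
  | cons e es ih =>
    intro a g hb hinv
    rw [List.foldl_cons]
    obtain ⟨hx, hx2, hy, hy2⟩ := hb e (by simp)
    obtain ⟨hl1, hc1⟩ := pv_upd_charB a g e.1 e.2 hx hx2 hinv
    set a1 := PySem.List.pySetD a e.1 (PySem.Set.add (PySem.List.pyGetD a e.1 PySem.Set.empty) e.2) with ha1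
    obtain ⟨hl2, hc2⟩ := pv_upd_charB a1
      (fun u w => g u w || (decide (u = e.1.toNat) && (w == e.2)))
      e.2 e.1 hy (by rw [hl1]; exact hy2)
      (by rw [hl1]; intro u hu w; exact hc1 u hu w)
    set a2 := PySem.List.pySetD a1 e.2 (PySem.Set.add (PySem.List.pyGetD a1 e.2 PySem.Set.empty) e.1) with ha2
    have hl2' : a2.length = a.length := by rw [hl2, hl1]
    obtain ⟨hl3, hc3⟩ := ih a2
      (fun u w => (g u w || (decide (u = e.1.toNat) && (w == e.2))) ||
        (decide (u = e.2.toNat) && (w == e.1)))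
      (by rw [hl2']; intro q hq; exact hb q (by simp [hq]))
      (by rw [hl2']; intro u hu w; exact hc2 u (by omega) w)
    rw [hl2'] at hl3 hc3
    have hstep : pvStepB a e = a2 := by
      rw [pvStepB, ← ha1, ← ha2]
    rw [hstep]
    refine ⟨hl3, ?_⟩
    intro u hu w
    rw [hc3 u hu w]
    show _ = (g u w || pvEAdj (e :: es) (u : Int) w)
    simp only [pvEAdj, List.any_cons]
    have h1 : (e.1 == (u : Int)) = decide (u = e.1.toNat) := by
      apply Bool.eq_iff_iff.mpr
      simp
      omega
    have h4 : (e.2 == (u : Int)) = decide (u = e.2.toNat) := by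
      apply Bool.eq_iff_iff.mpr
      simp
      omega
    have h2 : (e.2 == w) = (w == e.2) := by
      apply Bool.eq_iff_iff.mpr
      simp
      constructor <;> (intro h; omega)
    have h3 : (e.1 == w) = (w == e.1) := by
      apply Bool.eq_iff_iff.mpr
      simp
      constructor <;> (intro h; omega)
    rw [h1, h2, h3, h4]
    cases hg : g u w <;> cases hd1 : decide (u = e.1.toNat) <;> cases hd2 : (w == e.2) <;>
      cases hd3 : decide (u = e.2.toNat) <;> cases hd4 : (w == e.1) <;> simp

def pvBuildA (edges : List (Int × Int)) (n : Int) : List Int :=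
  edges.foldl pvStepA (List.replicate n.toNat 0)

def pvBuildB (edges : List (Int × Int)) (n : Int) : List (PySem.Set Int) :=
  edges.foldl pvStepB ((List.range n.toNat).map (fun _ => PySem.Set.empty))

lemma pv_buildA_char (edges : List (Int × Int)) (n : Int) (hpre : Pre_aut_size_bruteforce_py edges n) :
    (pvBuildA edges n).length = n.toNat ∧
    ∀ u : Nat, u < n.toNat → ∃ M : Nat, (pvBuildA edges n).getD u 0 = (M : Int) ∧
      ∀ w, M.testBit w = pvEAdj edges (u : Int) (w : Int) := by
  have hlen : (List.replicate n.toNat (0 : Int)).length = n.toNat := by simp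
  obtain ⟨h1, h2⟩ := pv_buildA_inv edges (List.replicate n.toNat 0) (fun _ _ => false)
    (by rw [hlen]; intro q hq; obtain ⟨a1, a2, a3, a4⟩ := hpre q hq; omega)
    (by intro u hu; exact ⟨0, by simp [List.getD_eq_getElem _ _ hu], by simp⟩)
  rw [hlen] at h1 h2
  refine ⟨h1, ?_⟩
  intro u hu
  obtain ⟨M, hM, hMc⟩ := h2 u hu
  exact ⟨M, hM, fun w => by rw [hMc w]; simp⟩

lemma pv_buildB_char (edges : List (Int × Int)) (n : Int) (hpre : Pre_aut_size_bruteforce_py edges n) :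
    (pvBuildB edges n).length = n.toNat ∧
    ∀ u : Nat, u < n.toNat → ∀ w : Int,
      PySem.Set.contains ((pvBuildB edges n).getD u PySem.Set.empty) w = pvEAdj edges (u : Int) w := by
  have hlen : ((List.range n.toNat).map (fun _ => (PySem.Set.empty : PySem.Set Int))).length = n.toNat := by simp
  obtain ⟨h1, h2⟩ := pv_buildB_inv edges ((List.range n.toNat).map (fun _ => PySem.Set.empty)) (fun _ _ => false)
    (by rw [hlen]; intro q hq; obtain ⟨a1, a2, a3, a4⟩ := hpre q hq; omega)
    (by intro u hu w
        rw [List.getD_eq_getElem _ _ hu]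
        simp)
  rw [hlen] at h1 h2
  refine ⟨h1, ?_⟩
  intro u hu w
  rw [pvBuildB, h2 u hu w]
  simp

lemma pv_eadj_symm (edges : List (Int × Int)) (a b : Int) : pvEAdj edges a b = pvEAdj edges b a := by
  simp only [pvEAdj]
  apply Bool.eq_iff_iff.mpr
  simp only [List.any_eq_true]
  constructor <;> (rintro ⟨q, hq, h⟩; exact ⟨q, hq, by revert h; cases h1 : (q.1 == a) <;> cases h2 : (q.1 == b) <;> cases h3 : (q.2 == a) <;> cases h4 : (q.2 == b) <;> simp⟩)

lemma pv_eadj_bounds (edges : List (Int × Int)) (n : Int)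
    (hpre : Pre_aut_size_bruteforce_py edges n) (a b : Int) (h : pvEAdj edges a b = true) :
    0 ≤ a ∧ a < n ∧ 0 ≤ b ∧ b < n := by
  simp only [pvEAdj, List.any_eq_true] at h
  obtain ⟨q, hq, hh⟩ := h
  obtain ⟨h1, h2, h3, h4⟩ := hpre q hq
  rcases (by simpa using hh : _ ∨ _) with h | h <;>
    · obtain ⟨ha, hb⟩ := (by simpa using h : _ ∧ _)
      omega

def pvRow (e : Int → Int → Bool) (p : List Int) (j : Nat) : Bool :=
  (List.range (j + 1)).all (fun i => e (j : Int) (i : Int) == e (p.getD j 0) (p.getD i 0))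

def pvSuff (e : Int → Int → Bool) (mapping rest : List Int) : Bool :=
  (List.range rest.length).all (fun t => pvRow e (mapping ++ rest) (mapping.length + t))

def pvSetRel (adjS : List (PySem.Set Int)) (a b : Int) : Bool :=
  PySem.Set.contains (PySem.List.pyGetD adjS a PySem.Set.empty) b

lemma pv_perms_zero (xs : List Int) : PySem.List.permutations xs 0 = [[]] := by
  simp [PySem.List.permutations]

lemma pv_perms_succ (xs : List Int) (r : Nat) :
    PySem.List.permutations xs (r + 1) =
      (List.range xs.length).flatMap (fun i =>
        match xs[i]? with
        | none => []
        | some x => (PySem.List.permutations (xs.eraseIdx i) r).map (fun p => x :: p)) := by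
  rw [PySem.List.permutations]
  congr 1
  funext i
  cases h : xs[i]? <;> simp [h]

lemma pv_all_congr_mem {α : Type} (l : List α) (p q : α → Bool)
    (h : ∀ a ∈ l, p a = q a) : l.all p = l.all q := by
  induction l with
  | nil => rfl
  | cons x t ih =>
    rw [List.all_cons, List.all_cons, h x (by simp), ih (fun a ha => h a (by simp [ha]))]

lemma pv_row_append (e : Int → Int → Bool) (p z : List Int) (j : Nat) (h : j < p.length) :
    pvRow e (p ++ z) j = pvRow e p j := by
  unfold pvRow
  apply pv_all_congr_mem
  intro i hi
  have hil : i < p.length := by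
    have := List.mem_range.mp hi
    omega
  rw [List.getD_append _ _ _ _ h, List.getD_append _ _ _ _ hil]

lemma pv_suff_cons (e : Int → Int → Bool) (m : List Int) (x : Int) (rest : List Int) :
    pvSuff e m (x :: rest) = (pvRow e (m ++ [x]) m.length && pvSuff e (m ++ [x]) rest) := by
  unfold pvSuff
  have hassoc : m ++ x :: rest = (m ++ [x]) ++ rest := by simp
  have hlen : (x :: rest).length = rest.length + 1 := rfl
  rw [hlen, List.range_succ_eq_map, List.all_cons, List.all_map]
  congr 1
  · rw [Nat.add_zero, hassoc, pv_row_append e (m ++ [x]) rest m.length (by simp)]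
  · apply pv_all_congr_mem
    intro t _
    show pvRow e (m ++ x :: rest) (m.length + (t + 1)) = pvRow e ((m ++ [x]) ++ rest) ((m ++ [x]).length + t)
    rw [hassoc]
    congr 1
    simp
    omega

lemma pv_extendFor_sum (adjS : List (PySem.Set Int)) (f : Nat) (m avail : List Int) :
    ∀ (iter : List Int) (total : Int),
      pvExtendFor adjS f m avail iter total =
        total + (iter.map (fun img =>
          if pvRowOK adjS (m.length : Int) img m then
            pvExtend adjS f (m ++ [img]) (avail.filter (fun w => w ≠ img)) else 0)).sum := by
  intro iter
  induction iter with
  | nil => intro total; simp [pvExtendFor]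
  | cons img rest ih =>
    intro total
    rw [pvExtendFor]
    by_cases h : pvRowOK adjS (m.length : Int) img m = true
    · rw [if_pos h, ih, List.map_cons, List.sum_cons, if_pos h]
      ring
    · rw [if_neg h, ih, List.map_cons, List.sum_cons, if_neg h]
      ring

lemma pv_rowOK_eq (adjS : List (PySem.Set Int)) (m : List Int) (x : Int) :
    pvRowOK adjS (m.length : Int) x m = pvRow (pvSetRel adjS) (m ++ [x]) m.length := by
  unfold pvRowOK pvRow pvSetRel
  rw [List.range_succ, List.all_append]
  have hx : (m ++ [x]).getD m.length 0 = x := by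
    rw [List.getD_eq_getElem _ _ (by simp)]
    simp
  have henum : (PySem.List.enumerate m 0).all (fun jm =>
       PySem.Set.contains (PySem.List.pyGetD adjS (m.length : Int) PySem.Set.empty) jm.1
         == PySem.Set.contains (PySem.List.pyGetD adjS x PySem.Set.empty) jm.2)
      = (List.range m.length).all (fun i =>
       PySem.Set.contains (PySem.List.pyGetD adjS ((m.length : Nat) : Int) PySem.Set.empty) ((i : Nat) : Int)
         == PySem.Set.contains (PySem.List.pyGetD adjS ((m ++ [x]).getD m.length 0) PySem.Set.empty) ((m ++ [x]).getD i 0)) := by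
    rw [PySem.List.enumerate_eq_map_pyRange m 0, List.all_map, PySem.List.len_eq,
      PySem.List.pyRange_zero_nat, List.all_map]
    apply pv_all_congr_mem
    intro i hi
    have hil : i < m.length := List.mem_range.mp hi
    simp only [Function.comp]
    rw [hx, List.getD_append _ _ _ _ hil]
    simp
  rw [henum]
  conv_lhs => rw [Bool.and_comm]
  congr 1
  rw [List.all_cons, List.all_nil, hx]
  simp

lemma pv_filter_eq_eraseIdx (l : List Int) (i : Nat) (h : i < l.length) (hnd : l.Nodup) :
    l.filter (fun w => w ≠ l[i]) = l.eraseIdx i := by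
  induction l generalizing i with
  | nil => simp at h
  | cons a t ih =>
    cases i with
    | zero =>
      rw [List.eraseIdx_cons_zero]
      have ha : (a :: t)[0] = a := rfl
      rw [ha, List.filter_cons]
      rw [if_neg (by simp)]
      have hnot : a ∉ t := (List.nodup_cons.mp hnd).1
      apply List.filter_eq_self.mpr
      intro b hb
      apply decide_eq_true
      intro hba
      subst hba
      exact hnot hb
    | succ i =>
      rw [List.eraseIdx_cons_succ]
      have hg : (a :: t)[i+1] = t[i]'(by simpa using h) := rfl
      rw [hg, List.filter_cons]
      have hmem : t[i]'(by simpa using h) ∈ t := List.getElem_mem _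
      have hane : a ≠ t[i]'(by simpa using h) := by
        intro hq
        exact (List.nodup_cons.mp hnd).1 (hq ▸ hmem)
      rw [if_pos (by simpa using hane)]
      rw [ih i (by simpa using h) (List.nodup_cons.mp hnd).2]

lemma pv_map_getD_range {β : Type} (l : List Int) (h : Int → β) :
    (List.range l.length).map (fun i => h (l.getD i 0)) = l.map h := by
  induction l with
  | nil => rfl
  | cons a t ih =>
    have hl : (a :: t).length = t.length + 1 := rfl
    rw [hl, List.range_succ_eq_map, List.map_cons, List.map_map, List.map_cons]
    have htail : List.map ((fun i => h ((a :: t).getD i 0)) ∘ Nat.succ) (List.range t.length)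
        = List.map h t := by
      rw [← ih]
      apply List.map_congr_left
      intro i _
      rfl
    rw [htail]
    rfl

lemma pv_countP_and_const {α : Type} (c : Bool) (f : α → Bool) (l : List α) :
    l.countP (fun x => c && f x) = if c then l.countP f else 0 := by
  cases c
  · simp [List.countP_false]
  · simp

lemma pv_suff_nil (e : Int → Int → Bool) (m : List Int) : pvSuff e m [] = true := by
  simp [pvSuff]

lemma pv_sum_cast_map {α : Type} (l : List α) (f : α → Nat) :
    (l.map (fun a => ((f a : Nat) : Int))).sum = (((l.map f).sum : Nat) : Int) := by
  induction l with
  | nil => rfl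
  | cons x t ih => simp [ih]

lemma pv_extend_count (adjS : List (PySem.Set Int)) :
    ∀ (L : Nat) (avail mapping : List Int), avail.length = L → avail.Nodup →
      pvExtend adjS L mapping avail
        = (((PySem.List.permutations avail L).countP
            (fun rest => pvSuff (pvSetRel adjS) mapping rest) : Nat) : Int) := by
  intro L
  induction L with
  | zero =>
    intro avail mapping hlen _
    have hnil : avail = [] := List.length_eq_zero_iff.mp hlen
    subst hnil
    rw [pvExtend, pv_perms_zero]
    simp [pv_suff_nil]
  | succ L ih =>
    intro avail mapping hlen hnd
    have hne : avail.isEmpty = false := by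
      cases avail
      · simp at hlen
      · rfl
    rw [pvExtend]
    rw [hne]
    simp only [Bool.false_eq_true, if_false]
    rw [pv_extendFor_sum, pv_perms_succ, List.countP_flatMap]
    have hmap : avail.map (fun img =>
          if pvRowOK adjS (mapping.length : Int) img mapping then
            pvExtend adjS L (mapping ++ [img]) (avail.filter (fun w => w ≠ img)) else 0)
        = (List.range avail.length).map (fun i =>
            ((List.countP (fun rest => pvSuff (pvSetRel adjS) mapping rest)
              (match avail[i]? with
               | none => []
               | some x => (PySem.List.permutations (avail.eraseIdx i) L).map (fun p => x :: p)) : Nat) : Int)) := by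
      rw [← pv_map_getD_range avail (fun img =>
        if pvRowOK adjS (mapping.length : Int) img mapping then
          pvExtend adjS L (mapping ++ [img]) (avail.filter (fun w => w ≠ img)) else 0)]
      apply List.map_congr_left
      intro i hi
      have hil : i < avail.length := List.mem_range.mp hi
      have hgd : avail.getD i 0 = avail[i] := List.getD_eq_getElem avail 0 hil
      simp only [Function.comp, List.getElem?_eq_getElem hil]
      rw [hgd]
      rw [List.countP_map]
      have hcomp : ((fun rest => pvSuff (pvSetRel adjS) mapping rest) ∘ fun p => avail[i] :: p)
          = fun rest => (pvRow (pvSetRel adjS) (mapping ++ [avail[i]]) mapping.length &&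
              pvSuff (pvSetRel adjS) (mapping ++ [avail[i]]) rest) := by
        funext rest
        simp only [Function.comp]
        exact pv_suff_cons (pvSetRel adjS) mapping avail[i] rest
      rw [hcomp, pv_countP_and_const, pv_rowOK_eq]
      by_cases hrow : pvRow (pvSetRel adjS) (mapping ++ [avail[i]]) mapping.length = true
      · rw [if_pos hrow, if_pos hrow]
        rw [pv_filter_eq_eraseIdx avail i hil hnd]
        exact ih (avail.eraseIdx i) (mapping ++ [avail[i]])
          (by rw [List.length_eraseIdx]; simp [hil]; omega)
          (hnd.eraseIdx i)
      · rw [if_neg hrow, if_neg hrow]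
        rfl
    rw [hmap, pv_sum_cast_map, zero_add]
    rfl

lemma pv_checkRows_all (adj perm : List Int) (us : List Int) :
    pvCheckRows adj perm us = us.all (fun u =>
      pvSpread perm (PySem.List.pyGetD adj u 0).toNat (PySem.List.pyGetD adj u 0) 0
        == PySem.List.pyGetD adj (PySem.List.pyGetD perm u 0) 0) := by
  induction us with
  | nil => rfl
  | cons u rest ih =>
    rw [pvCheckRows, List.all_cons, ← ih]
    by_cases h : pvSpread perm (PySem.List.pyGetD adj u 0).toNat (PySem.List.pyGetD adj u 0) 0
        = PySem.List.pyGetD adj (PySem.List.pyGetD perm u 0) 0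
    · rw [if_neg (by simpa using h)]
      simp [h]
    · rw [if_pos (by simpa using h)]
      simp [h]

-- row condition as a plain Prop over Nat pairs

lemma pv_row_iff (e : Int → Int → Bool) (p : List Int) (t : Nat) :
    pvRow e p t = true ↔ ∀ i : Nat, i ≤ t → e (t : Int) (i : Int) = e (p.getD t 0) (p.getD i 0) := by
  unfold pvRow
  rw [List.all_eq_true]
  constructor
  · intro h i hi
    have := h i (List.mem_range.mpr (by omega))
    exact beq_iff_eq.mp this
  · intro h i hi
    exact beq_iff_eq.mpr (h i (by have := List.mem_range.mp hi; omega))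

lemma pv_suff_nil_map (e : Int → Int → Bool) (p : List Int) :
    pvSuff e [] p = true ↔ ∀ t : Nat, t < p.length → pvRow e p t = true := by
  unfold pvSuff
  rw [List.all_eq_true]
  constructor
  · intro h t ht
    have := h t (List.mem_range.mpr ht)
    simpa using this
  · intro h t ht
    have := h t (List.mem_range.mp ht)
    simpa using this

lemma pv_perm_facts (n : Int) (p : List Int)
    (hp : p ∈ PySem.List.permutations (PySem.List.pyRange 0 n 1) (PySem.List.pyRange 0 n 1).length) :
    p.length = n.toNat ∧ p.Nodup ∧ (∀ x ∈ p, 0 ≤ x ∧ x < n) ∧ (∀ w : Int, 0 ≤ w → w < n → w ∈ p) := by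
  have hperm := PySem.List.perm_of_mem_permutations hp
  have hlrn : (PySem.List.pyRange 0 n 1).length = n.toNat := by
    rw [PySem.List.length_pyRange_one]
    simp
  refine ⟨by rw [hperm.length_eq, hlrn], (hperm.nodup_iff).mpr (PySem.List.nodup_pyRange_one 0 n), ?_, ?_⟩
  · intro x hx
    have := hperm.subset hx
    exact PySem.List.mem_pyRange_one.mp this
  · intro w h1 h2
    exact (hperm.mem_iff).mpr (PySem.List.mem_pyRange_one.mpr ⟨h1, h2⟩)

lemma pv_pairs_row (edges : List (Int × Int)) (n : Int) (p : List Int)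
    (hlenp : p.length = n.toNat) :
    pvSuff (pvEAdj edges) [] p = true ↔
      (∀ jN iN : Nat, jN < n.toNat → iN < n.toNat →
        pvEAdj edges (jN : Int) (iN : Int) = pvEAdj edges (p.getD jN 0) (p.getD iN 0)) := by
  rw [pv_suff_nil_map]
  constructor
  · intro h jN iN hj hi
    rcases Nat.lt_or_ge jN iN with hlt | hle
    · have := (pv_row_iff _ p iN).mp (h iN (by omega)) jN (by omega)
      rw [pv_eadj_symm edges (jN : Int) (iN : Int), this,
        pv_eadj_symm edges (p.getD iN 0) (p.getD jN 0)]
    · exact (pv_row_iff _ p jN).mp (h jN (by omega)) iN hle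
  · intro h t ht
    apply (pv_row_iff _ p t).mpr
    intro i hi
    exact h t i (by omega) (by omega)

lemma pv_pairs_A (edges : List (Int × Int)) (n : Int) (hpre : Pre_aut_size_bruteforce_py edges n) (p : List Int)
    (hp : p ∈ PySem.List.permutations (PySem.List.pyRange 0 n 1) (PySem.List.pyRange 0 n 1).length) :
    pvCheckRows (pvBuildA edges n) p (PySem.List.pyRange 0 n 1) = true ↔
      (∀ jN iN : Nat, jN < n.toNat → iN < n.toNat →
        pvEAdj edges (jN : Int) (iN : Int) = pvEAdj edges (p.getD jN 0) (p.getD iN 0)) := by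
  obtain ⟨hlenp, hnodup, hmem, hsurj⟩ := pv_perm_facts n p hp
  obtain ⟨hlenA, hchar⟩ := pv_buildA_char edges n hpre
  rw [pv_checkRows_all, List.all_eq_true]
  -- entries of p are in [0, n)
  have hent : ∀ jN : Nat, jN < n.toNat → 0 ≤ p.getD jN 0 ∧ p.getD jN 0 < n := by
    intro jN hj
    rw [List.getD_eq_getElem p 0 (by omega)]
    exact hmem _ (List.getElem_mem _)
  -- injectivity on getD
  have hinj : ∀ jN iN : Nat, jN < n.toNat → iN < n.toNat →
      p.getD jN 0 = p.getD iN 0 → jN = iN := by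
    intro jN iN hj hi hEq
    rw [List.getD_eq_getElem p 0 (by omega), List.getD_eq_getElem p 0 (by omega)] at hEq
    exact (hnodup.getElem_inj_iff).mp hEq
  -- surjectivity onto getD
  have hsurj' : ∀ w : Int, 0 ≤ w → w < n → ∃ vN : Nat, vN < n.toNat ∧ p.getD vN 0 = w := by
    intro w h1 h2
    obtain ⟨i, hilt, hieq⟩ := List.mem_iff_getElem.mp (hsurj w h1 h2)
    exact ⟨i, by omega, by rw [List.getD_eq_getElem p 0 hilt]; exact hieq⟩
  -- the per-row characterization of A's bitmask test
  have hU : ∀ uI : Int, uI ∈ PySem.List.pyRange 0 n 1 →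
      ((pvSpread p (PySem.List.pyGetD (pvBuildA edges n) uI 0).toNat
          (PySem.List.pyGetD (pvBuildA edges n) uI 0) 0
        == PySem.List.pyGetD (pvBuildA edges n) (PySem.List.pyGetD p uI 0) 0) = true ↔
       (∀ w : Nat, (∃ v : Nat, pvEAdj edges uI (v : Int) = true ∧ (p.getD v 0).toNat = w) ↔
          pvEAdj edges (p.getD uI.toNat 0) (w : Int) = true)) := by
    intro uI huI
    obtain ⟨hu0, hun⟩ := PySem.List.mem_pyRange_one.mp huI
    have huN : uI.toNat < n.toNat := by omega
    have hcastu : ((uI.toNat : Nat) : Int) = uI := by omega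
    obtain ⟨Mu, hMu, hMuc⟩ := hchar uI.toNat huN
    have hgetu : PySem.List.pyGetD (pvBuildA edges n) uI 0 = (Mu : Int) := by
      rw [PySem.List.pyGetD_eq_getElem _ 0 hu0 (by rw [hlenA]; exact_mod_cast (by omega : uI < (n.toNat : Int)))]
      rw [← List.getD_eq_getElem _ 0 (by rw [hlenA]; omega)]
      exact hMu
    rw [hgetu]
    have htn : ((Mu : Int)).toNat = Mu := by omega
    rw [htn]
    obtain ⟨r, hr, hrc⟩ := pv_spread_char p Mu Mu (le_refl Mu) 0
    have hr' : pvSpread p Mu ((Mu : Nat) : Int) 0 = (r : Int) := by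
      have h0 : ((0 : Nat) : Int) = (0 : Int) := by simp
      rw [← h0]
      exact hr
    rw [hr']
    have hpu : PySem.List.pyGetD p uI 0 = p.getD uI.toNat 0 := by
      rw [PySem.List.pyGetD_eq_getElem p 0 hu0 (by exact_mod_cast (by omega : uI < (p.length : Int)))]
      rw [← List.getD_eq_getElem p 0 (by omega)]
    obtain ⟨hpu0, hpun⟩ := hent uI.toNat huN
    obtain ⟨Mpu, hMpu, hMpuc⟩ := hchar (p.getD uI.toNat 0).toNat (by omega)
    have hgetpu : PySem.List.pyGetD (pvBuildA edges n) (PySem.List.pyGetD p uI 0) 0 = (Mpu : Int) := by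
      rw [hpu]
      rw [PySem.List.pyGetD_eq_getElem _ 0 hpu0 (by rw [hlenA]; exact_mod_cast (by omega : p.getD uI.toNat 0 < (n.toNat : Int)))]
      rw [← List.getD_eq_getElem _ 0 (by rw [hlenA]; omega)]
      exact hMpu
    rw [hgetpu, beq_iff_eq, Int.natCast_inj]
    have hcast : ((p.getD uI.toNat 0).toNat : Int) = p.getD uI.toNat 0 := by omega
    have hkey : ∀ w : Nat, (r.testBit w = true ↔
        (∃ v : Nat, pvEAdj edges uI (v : Int) = true ∧ (p.getD v 0).toNat = w)) := by
      intro w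
      rw [hrc w]
      simp only [Nat.zero_testBit, Bool.false_eq_true, false_or]
      constructor
      · rintro ⟨v, hv1, hv2⟩
        refine ⟨v, ?_, ?_⟩
        · rw [hMuc v, hcastu] at hv1
          exact hv1
        · rw [← hv2]
          congr 1
          exact (PySem.List.pyGetD_natCast p v 0).symm
      · rintro ⟨v, hv1, hv2⟩
        refine ⟨v, ?_, ?_⟩
        · rw [hMuc v, hcastu]
          exact hv1
        · rw [PySem.List.pyGetD_natCast p v 0]
          exact hv2
    have hkey2 : ∀ w : Nat, (Mpu.testBit w = true ↔
        pvEAdj edges (p.getD uI.toNat 0) (w : Int) = true) := by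
      intro w
      rw [hMpuc w, hcast]
    constructor
    · intro hEq w
      rw [← hkey w, ← hkey2 w, hEq]
    · intro hIff
      apply Nat.eq_of_testBit_eq
      intro w
      apply Bool.eq_iff_iff.mpr
      rw [hkey w, hkey2 w]
      exact hIff w
  constructor
  · intro hA jN iN hj hi
    have hmemj : ((jN : Nat) : Int) ∈ PySem.List.pyRange 0 n 1 :=
      PySem.List.mem_pyRange_one.mpr ⟨by positivity, by omega⟩
    have hUj := (hU (jN : Int) hmemj).mp (hA (jN : Int) hmemj)
    have htnj : ((jN : Nat) : Int).toNat = jN := by omega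
    rw [htnj] at hUj
    obtain ⟨hpi0, hpin⟩ := hent iN hi
    apply Bool.eq_iff_iff.mpr
    constructor
    · intro hjitrue
      have := (hUj ((p.getD iN 0).toNat)).mp ⟨iN, hjitrue, rfl⟩
      rwa [(by omega : (((p.getD iN 0).toNat : Nat) : Int) = p.getD iN 0)] at this
    · intro hq
      have hq' : pvEAdj edges (p.getD jN 0) (((p.getD iN 0).toNat : Nat) : Int) = true := by
        rwa [(by omega : (((p.getD iN 0).toNat : Nat) : Int) = p.getD iN 0)]
      obtain ⟨v, hv1, hv2⟩ := (hUj ((p.getD iN 0).toNat)).mpr hq'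
      obtain ⟨_, _, hv0, hvn⟩ := pv_eadj_bounds edges n hpre _ _ hv1
      have hvN : v < n.toNat := by omega
      have hpv0 : 0 ≤ p.getD v 0 := (hent v hvN).1
      have hEq : p.getD v 0 = p.getD iN 0 := by omega
      have : v = iN := hinj v iN hvN hi hEq
      subst this
      exact hv1
  · intro hPairs uI huI
    apply (hU uI huI).mpr
    obtain ⟨hu0, hun⟩ := PySem.List.mem_pyRange_one.mp huI
    have huN : uI.toNat < n.toNat := by omega
    have hcastu : ((uI.toNat : Nat) : Int) = uI := by omega
    intro w
    constructor
    · rintro ⟨v, hv1, hv2⟩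
      obtain ⟨_, _, hv0, hvn⟩ := pv_eadj_bounds edges n hpre _ _ hv1
      have hvN : v < n.toNat := by omega
      have hP := hPairs uI.toNat v huN hvN
      rw [hcastu] at hP
      have hpv0 : 0 ≤ p.getD v 0 := (hent v hvN).1
      have hwcast : ((w : Nat) : Int) = p.getD v 0 := by omega
      rw [hwcast, ← hP]
      exact hv1
    · intro hq
      obtain ⟨_, _, hw0, hwn⟩ := pv_eadj_bounds edges n hpre _ _ hq
      obtain ⟨vN, hvN, hveq⟩ := hsurj' (w : Int) (by positivity) hwn
      refine ⟨vN, ?_, ?_⟩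
      · have hP := hPairs uI.toNat vN huN hvN
        rw [hcastu] at hP
        rw [hP, hveq]
        exact hq
      · rw [hveq]
        omega

lemma pv_setRel_eq (edges : List (Int × Int)) (n : Int) (hpre : Pre_aut_size_bruteforce_py edges n)
    (a b : Int) (h1 : 0 ≤ a) (h2 : a < n) :
    pvSetRel (pvBuildB edges n) a b = pvEAdj edges a b := by
  obtain ⟨hlenB, hcharB⟩ := pv_buildB_char edges n hpre
  unfold pvSetRel
  rw [PySem.List.pyGetD_eq_getElem _ _ h1 (by rw [hlenB]; exact_mod_cast (by omega : a < (n.toNat : Int)))]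
  rw [← List.getD_eq_getElem _ _ (by rw [hlenB]; omega)]
  have := hcharB a.toNat (by omega) b
  rwa [(by omega : ((a.toNat : Nat) : Int) = a)] at this

lemma pv_suff_ext (edges : List (Int × Int)) (n : Int) (hpre : Pre_aut_size_bruteforce_py edges n) (p : List Int)
    (hp : p ∈ PySem.List.permutations (PySem.List.pyRange 0 n 1) (PySem.List.pyRange 0 n 1).length) :
    pvSuff (pvSetRel (pvBuildB edges n)) [] p = pvSuff (pvEAdj edges) [] p := by
  obtain ⟨hlenp, hnodup, hmem, hsurj⟩ := pv_perm_facts n p hp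
  have hent : ∀ jN : Nat, jN < n.toNat → 0 ≤ p.getD jN 0 ∧ p.getD jN 0 < n := by
    intro jN hj
    rw [List.getD_eq_getElem p 0 (by omega)]
    exact hmem _ (List.getElem_mem _)
  unfold pvSuff
  apply pv_all_congr_mem
  intro t ht
  have ht' : t < n.toNat := by
    have := List.mem_range.mp ht
    omega
  unfold pvRow
  apply pv_all_congr_mem
  intro i hi
  have hi' : i ≤ t := by
    have := List.mem_range.mp hi
    simp at this
    omega
  simp only [List.nil_append, List.length_nil, Nat.zero_add]
  rw [pv_setRel_eq edges n hpre _ _ (by positivity) (by omega)]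
  rw [pv_setRel_eq edges n hpre (p.getD t 0) _ (hent t ht').1 (hent t ht').2]

-- ===== VERDICT (by name: the statement is the Claim_ definition above) =====
theorem aut_size_bruteforce_py_spec : Claim_equal_aut_size_bruteforce_py := by
  intro edges n _hdom hpre
  unfold Spec_aut_size_bruteforce_py
  show (PySem.List.permutations (PySem.List.pyRange 0 n 1) (PySem.List.pyRange 0 n 1).length).foldl
      (fun count perm => if pvCheckRows (pvBuildA edges n) perm (PySem.List.pyRange 0 n 1)
        then count + 1 else count) 0
    = pvExtend (pvBuildB edges n) (PySem.List.pyRange 0 n 1).length [] (PySem.List.pyRange 0 n 1)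
  rw [PySem.List.foldl_if_add_one
    (fun perm => pvCheckRows (pvBuildA edges n) perm (PySem.List.pyRange 0 n 1))]
  rw [pv_extend_count (pvBuildB edges n) (PySem.List.pyRange 0 n 1).length
    (PySem.List.pyRange 0 n 1) [] rfl (PySem.List.nodup_pyRange_one 0 n)]
  rw [zero_add]
  congr 1
  apply List.countP_congr
  intro q hq
  obtain ⟨hlenp, _, _, _⟩ := pv_perm_facts n q hq
  rw [pv_suff_ext edges n hpre q hq]
  rw [Bool.coe_iff_coe]
  rw [Bool.eq_iff_iff, pv_pairs_A edges n hpre q hq, pv_pairs_row edges n q hlenp]
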